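-- pv_equiv track=rewrite | github.com/MikkelBBC/DatingAI | DatingAI.py | process_conversation
-- ===== SOURCE A (Python) =====
-- def process_conversation(text):
--     """Process text to identify message types"""
--     lines = text.split('\n')
--     result_lines = []
--
--     # Keywords to identify message types - these can be improved with machine learning in future versions
--     # The keywords below are examples and might need to be adjusted based on typical conversations
--     your_message_keywords = ["Jep", "Får", "Bare kom", "Sådan ik", "længt væk", "bor", "hvor du bor",
--                            "Jeg", "Tak", "Super", "Fedt", "Hvad med dig", "Skal vi", "Send",
--                            "Smiler", "Hvornår", "Jeg synes", "Helt sikkert"]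
--
--     their_message_keywords = ["Er det i dag", "Fuck måske", "Hvor er det", "Fair okay", "Men kommer",
--                            "arbejdstøj", "Mårslev", "Hej", "Hvad så", "Hvordan", "Jeg er",
--                            "Måske", "Har du", "Kan du", "Skal vi", "Ved ikke", "Hvad laver du"]
--
--     # Detect if text is on the right side based on indentation (specific to Messenger layout)
--     def is_right_side(text):
--         # If text starts with multiple spaces, it's likely on the right side
--         if text.startswith("    ") or text.startswith("\t") or "      " in text:
--             return True
--         return False
--
--     # Process each line
--     last_position = None
--     current_message = ""
--
--     for line in lines:
--         line = line.strip()
--         if not line: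
--             # Save any current message before continuing
--             if current_message and last_position is not None:
--                 if last_position == "right":
--                     result_lines.append(f"DIG (højre): {current_message.strip()}")
--                 else:
--                     result_lines.append(f"DEM (venstre): {current_message.strip()}")
--                 current_message = ""
--             continue
--
--         # Try to determine if this line is yours or theirs based on position and keywords
--         position_guess = "right" if is_right_side(line) else "left"
--
--         # Additional check based on keywords
--         if any(keyword in line for keyword in your_message_keywords):
--             position_guess = "right"
--         elif any(keyword in line for keyword in their_message_keywords):
--             position_guess = "left"
--
--         # If we're switching sides, save the current message
--         if last_position is not None and position_guess != last_position and current_message: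
--             if last_position == "right":
--                 result_lines.append(f"DIG (højre): {current_message.strip()}")
--             else:
--                 result_lines.append(f"DEM (venstre): {current_message.strip()}")
--             current_message = ""
--
--         # Add current line to the message
--         current_message += line + " "
--         last_position = position_guess
--
--     # Save the last message if there is one
--     if current_message and last_position is not None:
--         if last_position == "right":
--             result_lines.append(f"DIG (højre): {current_message.strip()}")
--         else:
--             result_lines.append(f"DEM (venstre): {current_message.strip()}")
--
--     # If we couldn't determine any messages, just return the raw text
--     if not result_lines:
--         return "Kunne ikke genkende beskedmønster. Rå tekst:\n\n" + text
--
--     return '\n'.join(result_lines)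
-- ===== SOURCE B (Python) =====
-- YOUR_KEYWORDS = ["Jep", "Får", "Bare kom", "Sådan ik", "længt væk", "bor", "hvor du bor",
--                  "Jeg", "Tak", "Super", "Fedt", "Hvad med dig", "Skal vi", "Send",
--                  "Smiler", "Hvornår", "Jeg synes", "Helt sikkert"]
--
-- THEIR_KEYWORDS = ["Er det i dag", "Fuck måske", "Hvor er det", "Fair okay", "Men kommer",
--                   "arbejdstøj", "Mårslev", "Hej", "Hvad så", "Hvordan", "Jeg er",
--                   "Måske", "Har du", "Kan du", "Skal vi", "Ved ikke", "Hvad laver du"]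
--
--
-- def _classify(s):
--     # s is already stripped, so only the in-line indentation marker can apply
--     if any(k in s for k in YOUR_KEYWORDS):
--         return "right"
--     if any(k in s for k in THEIR_KEYWORDS):
--         return "left"
--     return "right" if "      " in s else "left"
--
--
-- def process_conversation(text):
--     """Process text to identify message types (tokenize, then group runs)."""
--     # Pass 1: blank lines become None separators, others (side, stripped_text)
--     tokens = []
--     for raw in text.split('\n'):
--         s = raw.strip()
--         tokens.append((_classify(s), s) if s else None)
--
--     # Pass 2: group maximal same-side runs not interrupted by a separator
--     groups = []
--     i, n = 0, len(tokens)
--     while i < n: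
--         if tokens[i] is None:
--             i += 1
--             continue
--         pos, first = tokens[i]
--         parts = [first]
--         i += 1
--         while i < n and tokens[i] is not None and tokens[i][0] == pos:
--             parts.append(tokens[i][1])
--             i += 1
--         label = "DIG (højre): " if pos == "right" else "DEM (venstre): "
--         groups.append(label + " ".join(parts))
--
--     if not groups:
--         return "Kunne ikke genkende beskedmønster. Rå tekst:\n\n" + text
--     return '\n'.join(groups)
-- ===== Notes on version B (the rewrite author's own statement) =====
-- stated objective: alternative
-- what changed: Replaced A's single stateful scan (last_position/current_message accumulator with flush-on-switch and flush-on-blank) by a two-pass pipeline: tokenize every line into a separator or a (side, stripped text) token, then group maximal same-side runs between separators and join each run with spaces; the dead startswith-indentation tests (lines are already stripped) are dropped.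
import Mathlib
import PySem

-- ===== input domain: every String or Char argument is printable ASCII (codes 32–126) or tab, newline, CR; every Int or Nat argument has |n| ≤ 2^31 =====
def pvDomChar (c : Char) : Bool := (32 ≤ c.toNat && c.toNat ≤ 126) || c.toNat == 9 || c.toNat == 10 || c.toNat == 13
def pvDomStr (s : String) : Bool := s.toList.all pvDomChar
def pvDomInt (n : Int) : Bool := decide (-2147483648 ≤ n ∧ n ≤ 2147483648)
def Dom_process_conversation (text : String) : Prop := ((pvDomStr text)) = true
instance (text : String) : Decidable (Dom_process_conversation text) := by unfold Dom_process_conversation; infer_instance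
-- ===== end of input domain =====

-- B replaces A's single stateful scan by a two-pass tokenize-then-group pipeline (alternative decomposition, same cost).

-- ===== PORT A =====
def pvYourKwA : List (List Char) :=
  ["Jep".toList, "Får".toList, "Bare kom".toList, "Sådan ik".toList, "længt væk".toList, "bor".toList,
   "hvor du bor".toList, "Jeg".toList, "Tak".toList, "Super".toList, "Fedt".toList, "Hvad med dig".toList,
   "Skal vi".toList, "Send".toList, "Smiler".toList, "Hvornår".toList, "Jeg synes".toList, "Helt sikkert".toList]

def pvTheirKwA : List (List Char) :=
  ["Er det i dag".toList, "Fuck måske".toList, "Hvor er det".toList, "Fair okay".toList, "Men kommer".toList,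
   "arbejdstøj".toList, "Mårslev".toList, "Hej".toList, "Hvad så".toList, "Hvordan".toList, "Jeg er".toList,
   "Måske".toList, "Har du".toList, "Kan du".toList, "Skal vi".toList, "Ved ikke".toList, "Hvad laver du".toList]

def pvIsRightSideA (t : List Char) : Bool :=
  if PySem.Chars.startswith t "    ".toList || PySem.Chars.startswith t "\t".toList
     || PySem.Chars.isIn "      ".toList t then true else false

-- the f"DIG (højre): {...}" / f"DEM (venstre): {...}" branch A repeats three times
def pvEmitA (last : String) (cur : List Char) : List Char :=
  if last = "right" then "DIG (højre): ".toList ++ PySem.Chars.strip cur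
  else "DEM (venstre): ".toList ++ PySem.Chars.strip cur

def pvLoopA : List (List Char) → List (List Char) → Option String → List Char → List (List Char)
  | [], res, last, cur =>
      if cur ≠ [] ∧ last.isSome then res ++ [pvEmitA (last.getD "") cur] else res
  | l :: ls, res, last, cur =>
      let line := PySem.Chars.strip l
      if line = [] then
        if cur ≠ [] ∧ last.isSome then pvLoopA ls (res ++ [pvEmitA (last.getD "") cur]) last []
        else pvLoopA ls res last cur
      else
        let guess : String := if pvIsRightSideA line then "right" else "left"
        let pos : String :=
          if pvYourKwA.any (fun k => PySem.Chars.isIn k line) then "right"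
          else if pvTheirKwA.any (fun k => PySem.Chars.isIn k line) then "left"
          else guess
        if last.isSome ∧ pos ≠ last.getD "" ∧ cur ≠ [] then
          pvLoopA ls (res ++ [pvEmitA (last.getD "") cur]) (some pos) ([] ++ line ++ [' '])
        else
          pvLoopA ls res (some pos) (cur ++ line ++ [' '])

def process_conversation (text : String) : String :=
  let lines := PySem.Chars.splitOn text.toList "\n".toList
  let resultLines := pvLoopA lines [] none []
  if resultLines = [] then
    String.ofList ("Kunne ikke genkende beskedmønster. Rå tekst:\n\n".toList ++ text.toList)
  else
    String.ofList (PySem.Chars.join "\n".toList resultLines)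

-- ===== PORT B =====
def pvYourKwB : List (List Char) :=
  ["Jep".toList, "Får".toList, "Bare kom".toList, "Sådan ik".toList, "længt væk".toList, "bor".toList,
   "hvor du bor".toList, "Jeg".toList, "Tak".toList, "Super".toList, "Fedt".toList, "Hvad med dig".toList,
   "Skal vi".toList, "Send".toList, "Smiler".toList, "Hvornår".toList, "Jeg synes".toList, "Helt sikkert".toList]

def pvTheirKwB : List (List Char) :=
  ["Er det i dag".toList, "Fuck måske".toList, "Hvor er det".toList, "Fair okay".toList, "Men kommer".toList,
   "arbejdstøj".toList, "Mårslev".toList, "Hej".toList, "Hvad så".toList, "Hvordan".toList, "Jeg er".toList,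
   "Måske".toList, "Har du".toList, "Kan du".toList, "Skal vi".toList, "Ved ikke".toList, "Hvad laver du".toList]

def pvClassifyB (s : List Char) : String :=
  if pvYourKwB.any (fun k => PySem.Chars.isIn k s) then "right"
  else if pvTheirKwB.any (fun k => PySem.Chars.isIn k s) then "left"
  else if PySem.Chars.isIn "      ".toList s then "right" else "left"

def pvTokenB (raw : List Char) : Option (String × List Char) :=
  let s := PySem.Chars.strip raw
  if s = [] then none else some (pvClassifyB s, s)

-- the inner while loop: collect the rest of a run of side p
def pvCollectB (p : String) : List (Option (String × List Char)) →
    List (List Char) × List (Option (String × List Char))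
  | [] => ([], [])
  | none :: rest => ([], none :: rest)
  | some (q, s) :: rest =>
      if q = p then
        let (run, r) := pvCollectB p rest
        (s :: run, r)
      else ([], some (q, s) :: rest)

theorem pvCollectB_len (p : String) (ts : List (Option (String × List Char))) :
    (pvCollectB p ts).2.length ≤ ts.length := by
  induction ts with
  | nil => simp [pvCollectB]
  | cons t rest ih =>
      match t with
      | none => simp [pvCollectB]
      | some (q, s) =>
          by_cases h : q = p
          · simp only [pvCollectB, h, if_true]
            exact Nat.le_succ_of_le ih
          · simp [pvCollectB, h]

def pvLabelB (p : String) : List Char :=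
  if p = "right" then "DIG (højre): ".toList else "DEM (venstre): ".toList

def pvGroupsB : List (Option (String × List Char)) → List (List Char)
  | [] => []
  | none :: rest => pvGroupsB rest
  | some (p, s) :: rest =>
      (pvLabelB p ++ PySem.Chars.join [' '] (s :: (pvCollectB p rest).1)) :: pvGroupsB (pvCollectB p rest).2
  termination_by ts => ts.length
  decreasing_by
    · simp only [List.length_cons]; omega
    · simp only [List.length_cons]
      exact Nat.lt_succ_of_le (pvCollectB_len p rest)

def process_conversation_alt (text : String) : String :=
  let toks := (PySem.Chars.splitOn text.toList "\n".toList).map pvTokenB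
  let groups := pvGroupsB toks
  if groups = [] then
    String.ofList ("Kunne ikke genkende beskedmønster. Rå tekst:\n\n".toList ++ text.toList)
  else
    String.ofList (PySem.Chars.join "\n".toList groups)

-- ===== PRECONDITION & SPEC =====
def Spec_process_conversation (text : String) (out : String) : Prop := out = process_conversation_alt text
instance (text : String) (out : String) : Decidable (Spec_process_conversation text out) := by unfold Spec_process_conversation; infer_instance

-- ===== CLAIM (what is proved, stated in full; the proofs are below) =====
def Claim_equal_process_conversation : Prop := ∀ (text : String), Dom_process_conversation text → Spec_process_conversation text (process_conversation text)

-- ===== LEMMAS AND PROOFS =====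

-- a message with no whitespace at either edge (invariant of A's current_message contents)
def PvGood (m : List Char) : Prop :=
  m ≠ [] ∧ (∀ c ∈ m.head?, PySem.Chars.isspace c = false) ∧ (∀ c ∈ m.getLast?, PySem.Chars.isspace c = false)

theorem pv_head?_dropWhile {p : Char → Bool} {xs : List Char} {c : Char}
    (h : (List.dropWhile p xs).head? = some c) : p c = false := by
  induction xs with
  | nil => simp at h
  | cons x t ih =>
      by_cases hx : p x
      · rw [List.dropWhile_cons_of_pos hx] at h; exact ih h
      · rw [List.dropWhile_cons_of_neg hx] at h
        simp at h; subst h; exact Bool.eq_false_iff.mpr hx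

theorem pv_head?_of_prefix {l m : List Char} (h : l <+: m) (hl : l ≠ []) : m.head? = l.head? := by
  obtain ⟨u, rfl⟩ := h
  cases l with
  | nil => exact absurd rfl hl
  | cons c t => rfl

theorem pv_lstrip_eq_self {m : List Char} (h : ∀ c ∈ m.head?, PySem.Chars.isspace c = false) :
    PySem.Chars.lstrip m = m := by
  cases m with
  | nil => rfl
  | cons c t =>
      have hc : PySem.Chars.isspace c = false := h c rfl
      simp [PySem.Chars.lstrip, hc]

theorem pv_good_strip (l : List Char) (h : PySem.Chars.strip l ≠ []) : PvGood (PySem.Chars.strip l) := by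
  refine ⟨h, ?_, ?_⟩
  · intro c hc
    have h1 : List.dropWhile PySem.Chars.isspace (PySem.Chars.lstrip l).reverse
        <:+ (PySem.Chars.lstrip l).reverse := List.dropWhile_suffix _
    have h2 : PySem.Chars.strip l <+: PySem.Chars.lstrip l := by
      have h2' := List.reverse_prefix.mpr h1
      simpa [PySem.Chars.strip, PySem.Chars.rstrip] using h2'
    have h3 := pv_head?_of_prefix h2 h
    have h4 : (PySem.Chars.lstrip l).head? = some c := by
      rw [h3]; exact hc
    exact pv_head?_dropWhile (by simpa [PySem.Chars.lstrip] using h4)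
  · intro c hc
    have h5 : (PySem.Chars.strip l).getLast? =
        (List.dropWhile PySem.Chars.isspace (PySem.Chars.lstrip l).reverse).head? := by
      rw [PySem.Chars.strip, PySem.Chars.rstrip, List.getLast?_reverse]
    rw [Option.mem_def, h5] at hc
    exact pv_head?_dropWhile hc

theorem pv_strip_append_space {m : List Char} (h : PvGood m) :
    PySem.Chars.strip (m ++ [' ']) = m := by
  obtain ⟨hne, hhd, hlast⟩ := h
  have hl : PySem.Chars.lstrip (m ++ [' ']) = m ++ [' '] := by
    apply pv_lstrip_eq_self
    intro c hc
    apply hhd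
    cases m with
    | nil => exact absurd rfl hne
    | cons a t => simpa using hc
  have hr : PySem.Chars.rstrip (m ++ [' ']) = m := by
    have hsp : PySem.Chars.isspace ' ' = true := by decide
    have hdw : List.dropWhile PySem.Chars.isspace m.reverse = m.reverse := by
      cases hrev : m.reverse with
      | nil => rfl
      | cons a t =>
          have ha : PySem.Chars.isspace a = false := by
            apply hlast
            rw [← List.head?_reverse, hrev]; rfl
          rw [List.dropWhile_cons_of_neg (by simp [ha])]
    simp [PySem.Chars.rstrip, List.reverse_append, hsp, hdw]
  rw [PySem.Chars.strip, hl, hr]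

theorem pv_good_extend {m s : List Char} (hm : PvGood m) (hs : PvGood s) :
    PvGood (m ++ ' ' :: s) := by
  obtain ⟨hmne, hmh, hml⟩ := hm
  obtain ⟨hsne, hsh, hsl⟩ := hs
  refine ⟨by simp, ?_, ?_⟩
  · intro c hc
    apply hmh
    cases m with
    | nil => exact absurd rfl hmne
    | cons a t => simpa using hc
  · intro c hc
    apply hsl
    rw [show (m ++ ' ' :: s) = (m ++ [' ']) ++ s by simp,
        List.getLast?_append_of_ne_nil _ hsne] at hc
    exact hc

theorem pv_isRight_eq {m : List Char} (h : ∀ c ∈ m.head?, PySem.Chars.isspace c = false) :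
    pvIsRightSideA m = PySem.Chars.isIn "      ".toList m := by
  cases m with
  | nil => simp [pvIsRightSideA, PySem.Chars.startswith]
  | cons c t =>
      have hc : PySem.Chars.isspace c = false := h c rfl
      have hcsp : c ≠ ' ' := by intro he; subst he; exact absurd hc (by decide)
      have hctab : c ≠ '\t' := by intro he; subst he; exact absurd hc (by decide)
      have h1 : PySem.Chars.startswith (c :: t) [' ', ' ', ' ', ' '] = false := by
        simp [PySem.Chars.startswith, List.isPrefixOf]
        intro he; exact absurd he.symm hcsp
      have h2 : PySem.Chars.startswith (c :: t) ['\t'] = false := by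
        simp [PySem.Chars.startswith, List.isPrefixOf]
        intro he; exact absurd he.symm hctab
      simp [pvIsRightSideA, h1, h2]

-- join with a leading space per part (tail of a ' '-intercalation)
def pvSepJoin (parts : List (List Char)) : List Char :=
  (parts.map (fun t => ' ' :: t)).flatten

theorem pv_join_cons (s : List Char) (parts : List (List Char)) :
    PySem.Chars.join [' '] (s :: parts) = s ++ pvSepJoin parts := by
  induction parts generalizing s with
  | nil => simp [PySem.Chars.join, List.intercalate, pvSepJoin]
  | cons p ps ih =>
      have : PySem.Chars.join [' '] (s :: p :: ps) = s ++ [' '] ++ PySem.Chars.join [' '] (p :: ps) := by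
        simp [PySem.Chars.join, List.intercalate]
      rw [this, ih p, pvSepJoin, pvSepJoin]
      simp

-- A's open-run continuation, phrased on B's token list
def pvChase (p : String) (m : List Char) : List (Option (String × List Char)) → List (List Char)
  | [] => [pvLabelB p ++ m]
  | none :: r => (pvLabelB p ++ m) :: pvGroupsB r
  | some (q, s) :: r => if q = p then pvChase p (m ++ ' ' :: s) r else (pvLabelB p ++ m) :: pvGroupsB (some (q, s) :: r)

theorem pv_groupsB_nil : pvGroupsB [] = [] := by rw [pvGroupsB]

theorem pv_groupsB_none (r : List (Option (String × List Char))) :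
    pvGroupsB (none :: r) = pvGroupsB r := by rw [pvGroupsB]

theorem pv_chase_spec : ∀ (r : List (Option (String × List Char))) (p : String) (m : List Char),
    pvChase p m r = (pvLabelB p ++ (m ++ pvSepJoin (pvCollectB p r).1)) :: pvGroupsB (pvCollectB p r).2 := by
  intro r
  induction r with
  | nil => intro p m; simp [pvChase, pvCollectB, pvSepJoin, pv_groupsB_nil]
  | cons t rest ih =>
      intro p m
      match t with
      | none => simp [pvChase, pvCollectB, pvSepJoin, pv_groupsB_none]
      | some (q, s) =>
          by_cases h : q = p
          · subst h
            rw [pvChase, if_pos rfl, ih, pvCollectB, if_pos rfl]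
            simp [pvSepJoin]
          · rw [pvChase, if_neg h, pvCollectB]
            simp [h, pvSepJoin]

theorem pv_groupsB_cons (p : String) (s : List Char) (r : List (Option (String × List Char))) :
    pvGroupsB (some (p, s) :: r) = pvChase p s r := by
  rw [pvGroupsB, pv_chase_spec, pv_join_cons]

theorem pv_emit_eq (p : String) {m : List Char} (h : PvGood m) :
    pvEmitA p (m ++ [' ']) = pvLabelB p ++ m := by
  by_cases hp : p = "right" <;> simp [pvEmitA, pvLabelB, hp, pv_strip_append_space h]

theorem pv_classify_eq {line : List Char} (h : ∀ c ∈ line.head?, PySem.Chars.isspace c = false) :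
    (if pvYourKwA.any (fun k => PySem.Chars.isIn k line) then "right"
     else if pvTheirKwA.any (fun k => PySem.Chars.isIn k line) then "left"
     else if pvIsRightSideA line then "right" else "left") = pvClassifyB line := by
  have hy : pvYourKwA = pvYourKwB := rfl
  have ht : pvTheirKwA = pvTheirKwB := rfl
  rw [pvClassifyB, ← hy, ← ht, pv_isRight_eq h]

theorem pv_main (ls : List (List Char)) : ∀ (res : List (List Char)),
    (∀ last, pvLoopA ls res last [] = res ++ pvGroupsB (ls.map pvTokenB))
    ∧ (∀ (p : String) (m : List Char), PvGood m →
        pvLoopA ls res (some p) (m ++ [' ']) = res ++ pvChase p m (ls.map pvTokenB)) := by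
  induction ls with
  | nil =>
      intro res
      constructor
      · intro last; simp [pvLoopA, pvGroupsB]
      · intro p m hm
        have hne : m ++ [' '] ≠ [] := by simp
        simp only [pvLoopA, List.map_nil]
        rw [if_pos ⟨hne, rfl⟩]
        simp [pvChase, pv_emit_eq p hm]
  | cons l ls ih =>
      intro res
      by_cases hs : PySem.Chars.strip l = []
      · have htok : pvTokenB l = none := by simp [pvTokenB, hs]
        constructor
        · intro last
          simp only [pvLoopA, hs]
          simp only [List.map_cons, htok, pv_groupsB_none]
          simpa using (ih res).1 last
        · intro p m hm
          have hne : m ++ [' '] ≠ [] := by simp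
          simp only [pvLoopA, hs]
          rw [if_pos trivial, if_pos ⟨hne, rfl⟩]
          rw [(ih (res ++ [pvEmitA ((some p).getD "") (m ++ [' '])])).1 (some p)]
          simp only [List.map_cons, htok, pvChase, pv_emit_eq p hm, Option.getD_some]
          simp
      · have hgood := pv_good_strip l hs
        have htok : pvTokenB l = some (pvClassifyB (PySem.Chars.strip l), PySem.Chars.strip l) := by
          simp [pvTokenB, hs]
        constructor
        · intro last
          simp only [pvLoopA, hs]
          rw [if_neg not_false]
          rw [pv_classify_eq hgood.2.1]
          have hcond : ¬ (last.isSome = true ∧ pvClassifyB (PySem.Chars.strip l) ≠ last.getD "" ∧ ([] : List Char) ≠ []) := by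
            intro hcon; exact hcon.2.2 rfl
          rw [if_neg hcond]
          simp only [List.nil_append]
          rw [(ih res).2 (pvClassifyB (PySem.Chars.strip l)) (PySem.Chars.strip l) hgood]
          simp only [List.map_cons, htok, pv_groupsB_cons]
        · intro p m hm
          simp only [pvLoopA, hs]
          rw [if_neg not_false]
          rw [pv_classify_eq hgood.2.1]
          simp only [List.map_cons, htok]
          by_cases hpq : pvClassifyB (PySem.Chars.strip l) = p
          · have hcond : ¬ ((some p).isSome = true ∧ pvClassifyB (PySem.Chars.strip l) ≠ (some p).getD "" ∧ m ++ [' '] ≠ []) := by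
              intro hcon; exact hcon.2.1 (by simpa using hpq)
            rw [if_neg hcond]
            have harr : (m ++ [' ']) ++ PySem.Chars.strip l ++ [' '] = (m ++ ' ' :: PySem.Chars.strip l) ++ [' '] := by
              simp
            rw [harr, (ih res).2 (pvClassifyB (PySem.Chars.strip l)) (m ++ ' ' :: PySem.Chars.strip l) (pv_good_extend hm hgood)]
            rw [pvChase, if_pos hpq, hpq]
          · have hcond : ((some p).isSome = true ∧ pvClassifyB (PySem.Chars.strip l) ≠ (some p).getD "" ∧ m ++ [' '] ≠ []) := by
              refine ⟨rfl, by simpa using hpq, by simp⟩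
            rw [if_pos hcond]
            simp only [List.nil_append, Option.getD_some]
            rw [(ih (res ++ [pvEmitA p (m ++ [' '])])).2 (pvClassifyB (PySem.Chars.strip l)) (PySem.Chars.strip l) hgood]
            rw [pvChase, if_neg hpq, pv_groupsB_cons, pv_emit_eq p hm]
            simp

-- ===== VERDICT (by name: the statement is the Claim_ definition above) =====
theorem process_conversation_spec : Claim_equal_process_conversation := by
  intro text _
  unfold Spec_process_conversation process_conversation process_conversation_alt
  have h := (pv_main (PySem.Chars.splitOn text.toList "\n".toList) []).1 none
  rw [List.nil_append] at h
  simp only [h]
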